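-- pv_equiv track=rewrite | github.com/filipzz/athena | code/risk.py | find_kmins_for_risk
-- ===== SOURCE A (Python) =====
-- def find_kmins_for_risk(audit_kmins, actual_kmins):
--
--     kmins_goal_real = []
--     rewrite_on = 1
--     for i in range(min(len(audit_kmins), len(actual_kmins))-1):
--         if rewrite_on == 1:
--             if audit_kmins[i] <= actual_kmins[i]:
--                 kmins_goal_real.append(actual_kmins[i])
--                 rewrite_on = 0
--             else:
--                 kmins_goal_real.append(audit_kmins[i])
--
--     if rewrite_on == 1:
--         kmins_goal_real.append(actual_kmins[len(actual_kmins)-1])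
--
--     return kmins_goal_real
-- ===== SOURCE B (Python) =====
-- def find_kmins_for_risk(audit_kmins, actual_kmins):
--     # Build the answer back-to-front: a right-to-left fold over the compared pairs,
--     # kept in reversed order (O(1) appends) and reversed once at the end.
--     # ans_rev reversed is the answer for the suffix starting at the current pair.
--     ans_rev = [actual_kmins[-1]]
--     for x, y in reversed(list(zip(audit_kmins, actual_kmins))[:-1]):
--         if x <= y:
--             ans_rev = [y]
--         else:
--             ans_rev.append(x)
--     return list(reversed(ans_rev))
-- ===== Notes on version B (the rewrite author's own statement) =====
-- stated objective: alternative
-- what changed: Builds the result back-to-front with a right-to-left fold over the zipped pairs (the answer for each suffix), replacing A's left-to-right flag-controlled accumulation loop; Pre_ excludes actual_kmins = [], where A raises IndexError (B raises there too).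
import Mathlib
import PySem

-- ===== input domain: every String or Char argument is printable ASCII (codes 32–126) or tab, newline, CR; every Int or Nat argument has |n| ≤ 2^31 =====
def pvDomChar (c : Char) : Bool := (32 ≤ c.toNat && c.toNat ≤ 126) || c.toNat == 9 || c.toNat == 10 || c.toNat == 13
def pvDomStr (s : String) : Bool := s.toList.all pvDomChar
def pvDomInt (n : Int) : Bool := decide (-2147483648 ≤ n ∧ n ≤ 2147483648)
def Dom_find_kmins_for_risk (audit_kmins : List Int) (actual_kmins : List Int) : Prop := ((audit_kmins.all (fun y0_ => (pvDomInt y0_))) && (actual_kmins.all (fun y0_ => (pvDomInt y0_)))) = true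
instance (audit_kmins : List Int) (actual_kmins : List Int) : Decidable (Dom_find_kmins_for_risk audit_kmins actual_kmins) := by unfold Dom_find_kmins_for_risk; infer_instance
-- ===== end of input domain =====

-- B builds the result back-to-front by a right-to-left fold over the zipped pairs, instead of
-- A's left-to-right flag-controlled accumulation loop: a different traversal order, same cost.


-- ===== PORT A =====
def find_kmins_for_risk (audit_kmins : List Int) (actual_kmins : List Int) : List Int :=
  let st :=
    (PySem.List.pyRange 0 (min (audit_kmins.length : Int) (actual_kmins.length : Int) - 1) 1).foldl
      (fun (st : List Int × Int) i =>
        if st.2 == 1 then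
          if PySem.List.pyGetD audit_kmins i 0 ≤ PySem.List.pyGetD actual_kmins i 0 then
            (st.1 ++ [PySem.List.pyGetD actual_kmins i 0], 0)
          else
            (st.1 ++ [PySem.List.pyGetD audit_kmins i 0], st.2)
        else st) ([], 1)
  if st.2 == 1 then
    st.1 ++ [PySem.List.pyGetD actual_kmins ((actual_kmins.length : Int) - 1) 0]
  else st.1

-- ===== PORT B =====
-- Source B: ans_rev = [actual_kmins[-1]]; for x, y in reversed(list(zip(...))[:-1]):
--          ans_rev = [y] if x <= y else ans_rev + append x;  return list(reversed(ans_rev))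
def find_kmins_for_risk_alt (audit_kmins : List Int) (actual_kmins : List Int) : List Int :=
  ((PySem.List.slice (audit_kmins.zip actual_kmins) none (some (-1))).reverse.foldl
    (fun ans_rev xy => if xy.1 ≤ xy.2 then [xy.2] else ans_rev ++ [xy.1])
    [PySem.List.pyGetD actual_kmins (-1) 0]).reverse

-- ===== PRECONDITION & SPEC =====
-- Pre_ excludes exactly the inputs where Python A raises IndexError: actual_kmins = []
-- (actual_kmins[len(actual_kmins)-1] on the empty list); B raises there too.
def Pre_find_kmins_for_risk (_audit_kmins : List Int) (actual_kmins : List Int) : Prop :=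
  actual_kmins ≠ []
instance (audit_kmins : List Int) (actual_kmins : List Int) : Decidable (Pre_find_kmins_for_risk audit_kmins actual_kmins) := by unfold Pre_find_kmins_for_risk; infer_instance

def pvWitness_find_kmins_for_risk : List Int × List Int := ([3, 1, 4], [2, 5, 6])

def Spec_find_kmins_for_risk (audit_kmins : List Int) (actual_kmins : List Int) (out : List Int) : Prop := out = find_kmins_for_risk_alt audit_kmins actual_kmins
instance (audit_kmins : List Int) (actual_kmins : List Int) (out : List Int) : Decidable (Spec_find_kmins_for_risk audit_kmins actual_kmins out) := by unfold Spec_find_kmins_for_risk; infer_instance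

-- ===== CLAIM (what is proved, stated in full; the proofs are below) =====
def Claim_equal_find_kmins_for_risk : Prop := ∀ (audit_kmins : List Int) (actual_kmins : List Int), Dom_find_kmins_for_risk audit_kmins actual_kmins → Pre_find_kmins_for_risk audit_kmins actual_kmins → Spec_find_kmins_for_risk audit_kmins actual_kmins (find_kmins_for_risk audit_kmins actual_kmins)

-- ===== LEMMAS AND PROOFS =====

-- A's loop step, abbreviated for the lemmas.
def pvStep (a b : List Int) (st : List Int × Int) (i : Int) : List Int × Int :=
  if st.2 == 1 then
    if PySem.List.pyGetD a i 0 ≤ PySem.List.pyGetD b i 0 then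
      (st.1 ++ [PySem.List.pyGetD b i 0], 0)
    else
      (st.1 ++ [PySem.List.pyGetD a i 0], st.2)
  else st

-- B's fold step.
def pvF (xy : Int × Int) (ans : List Int) : List Int :=
  if xy.1 ≤ xy.2 then [xy.2] else xy.1 :: ans

lemma pvStep_dead (a b : List Int) (xs : List Int) (acc : List Int) :
    xs.foldl (pvStep a b) (acc, 0) = (acc, 0) := by
  induction xs with
  | nil => rfl
  | cons x xs ih => simpa [pvStep] using ih

lemma pvDropLast_short {α : Type} (l : List α) (h : l.length ≤ 1) : l.dropLast = [] := by
  match l with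
  | [] => rfl
  | [x] => rfl
  | x :: y :: r => simp at h

-- A's loop-plus-final-append from position s equals B's right fold over the remaining pairs.
lemma pvA_run (a b : List Int) (last : Int) :
    ∀ (m s : Nat) (acc : List Int),
      (min (a.length : Int) (b.length : Int) - 1 - (s : Int)).toNat = m →
      (let st := (PySem.List.pyRange (s : Int) (min (a.length : Int) (b.length : Int) - 1) 1).foldl
          (pvStep a b) (acc, 1)
       if st.2 == 1 then st.1 ++ [last] else st.1)
      = acc ++ (((a.drop s).zip (b.drop s)).dropLast).foldr pvF [last] := by
  intro m
  induction m with
  | zero =>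
    intro s acc hm
    have hle : min (a.length : Int) (b.length : Int) - 1 ≤ (s : Int) := by omega
    rw [PySem.List.pyRange_one_eq_nil hle]
    have hz : ((a.drop s).zip (b.drop s)).length ≤ 1 := by
      simp only [List.length_zip, List.length_drop]
      omega
    rw [pvDropLast_short _ hz]
    simp
  | succ m ih =>
    intro s acc hm
    have hs : (s : Int) < min (a.length : Int) (b.length : Int) - 1 := by omega
    have hsa : s < a.length := by omega
    have hsc : s < b.length := by omega
    rw [PySem.List.pyRange_one_cons hs]
    rw [List.drop_eq_getElem_cons hsa, List.drop_eq_getElem_cons hsc]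
    have hga : PySem.List.pyGetD a (s : Int) 0 = a[s] := by
      rw [PySem.List.pyGetD_natCast, List.getD_eq_getElem a 0 hsa]
    have hgc : PySem.List.pyGetD b (s : Int) 0 = b[s] := by
      rw [PySem.List.pyGetD_natCast, List.getD_eq_getElem b 0 hsc]
    have htl : ((a.drop (s + 1)).zip (b.drop (s + 1))) ≠ [] := by
      have : ((a.drop (s + 1)).zip (b.drop (s + 1))).length ≠ 0 := by
        simp only [List.length_zip, List.length_drop]
        omega
      exact fun h => this (by rw [h]; rfl)
    rw [List.zip_cons_cons, List.dropLast_cons_of_ne_nil htl]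
    by_cases hcmp : a[s] ≤ b[s]
    · simp only [List.foldl_cons, pvStep, hga, hgc, beq_self_eq_true, hcmp, if_pos, pvStep_dead]
      simp [List.foldr_cons, pvF, hcmp]
    · simp only [List.foldl_cons, pvStep, hga, hgc, beq_self_eq_true, if_true, hcmp, if_neg,
        not_false_iff]
      have hcast : (s : Int) + 1 = ((s + 1 : Nat) : Int) := by push_cast; ring
      rw [hcast]
      rw [ih (s + 1) (acc ++ [a[s]]) (by omega)]
      simp [pvF, hcmp]

-- the reversed-accumulator loop over the reversed list, re-reversed, is the right fold.
lemma pvRevFold (r : List Int) (l : List (Int × Int)) :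
    (l.reverse.foldl (fun ans_rev xy => if xy.1 ≤ xy.2 then [xy.2] else ans_rev ++ [xy.1])
        r).reverse
      = l.foldr pvF r.reverse := by
  induction l with
  | nil => rfl
  | cons xy t ih =>
    rw [List.reverse_cons, List.foldl_append, List.foldr_cons, ← ih]
    by_cases hcmp : xy.1 ≤ xy.2 <;> simp [pvF, hcmp]

-- B unfolds to the right fold over the dropLast'ed zip.
lemma pvB_char (a b : List Int) :
    find_kmins_for_risk_alt a b
      = ((a.zip b).dropLast).foldr pvF [PySem.List.pyGetD b (-1) 0] := by
  unfold find_kmins_for_risk_alt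
  rw [PySem.List.slice_to_neg_one, pvRevFold]
  rfl

-- ===== VERDICT (by name: the statement is the Claim_ definition above) =====
theorem find_kmins_for_risk_spec : Claim_equal_find_kmins_for_risk := by
  intro a b _hdom hpre
  unfold Spec_find_kmins_for_risk
  rw [pvB_char]
  have hlast : PySem.List.pyGetD b ((b.length : Int) - 1) 0 = PySem.List.pyGetD b (-1) 0 := by
    have hc : 0 < b.length := List.length_pos_of_ne_nil hpre
    rw [PySem.List.pyGetD_neg_one b 0 hpre, List.getLast_eq_getElem hpre]
    rw [show ((b.length : Int) - 1) = ((b.length - 1 : Nat) : Int) by omega,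
      PySem.List.pyGetD_natCast, List.getD_eq_getElem b 0 (by omega)]
  have h := pvA_run a b (PySem.List.pyGetD b (-1) 0)
      (min (a.length : Int) (b.length : Int) - 1).toNat 0 [] (by omega)
  simp only [Nat.cast_zero, List.drop_zero, List.nil_append] at h
  unfold find_kmins_for_risk
  rw [hlast]
  exact h
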